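-- pv_equiv track=rewrite | github.com/mchang21/Advent_Of_Code | 2021/Day_09/9.py | multiply_three_largest
-- ===== SOURCE A (Python) =====
-- def multiply_three_largest(data, basins):
--     def dfs(x,y):
--         for i, j in [(x+1, y), (x-1,y), (x,y+1), (x,y-1)]:
--             if 0 <= i < m and 0 <= j < n and (i,j) not in visited and data[i][j] != 9:
--                 visited.add((i,j))
--                 dfs(i,j)
--         return
--     m, n = len(data), len(data[0])
--     sizes = []
--     for (x,y) in basins:
--         visited = set([(x,y)])
--         dfs(x,y)
--         sizes.append(len(visited))
--     sizes.sort()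
--     return sizes[-1] * sizes[-2] * sizes[-3]
-- ===== SOURCE B (Python) =====
-- def multiply_three_largest(data, basins):
--     m, n = len(data), len(data[0])
--     a = b = c = 0
--     for seed in basins:
--         comp = {seed}
--         frontier = [seed]
--         while frontier:
--             nxt = []
--             for x, y in frontier:
--                 for i, j in ((x + 1, y), (x - 1, y), (x, y + 1), (x, y - 1)):
--                     if 0 <= i < m and 0 <= j < n and (i, j) not in comp and data[i][j] != 9:
--                         comp.add((i, j))
--                         nxt.append((i, j))
--             frontier = nxt
--         s = len(comp)
--         if s >= c:
--             a, b, c = b, c, s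
--         elif s >= b:
--             a, b = b, s
--         elif s >= a:
--             a = s
--     return a * b * c
-- ===== Notes on version B (the rewrite author's own statement) =====
-- stated objective: alternative
-- what changed: The recursive per-cell flood fill becomes a frontier-at-a-time (level-by-level) expansion, and the sort plus negative-index product of the three largest sizes becomes a running sorted top-three accumulator updated once per basin, so no size list is ever built or sorted.
-- outside the precondition, e.g. on multiply_three_largest([[9, 9], [9]], [(0, 0), (0, 0), (0, 0)]): A returns 1, B returns 1
import Mathlib
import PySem

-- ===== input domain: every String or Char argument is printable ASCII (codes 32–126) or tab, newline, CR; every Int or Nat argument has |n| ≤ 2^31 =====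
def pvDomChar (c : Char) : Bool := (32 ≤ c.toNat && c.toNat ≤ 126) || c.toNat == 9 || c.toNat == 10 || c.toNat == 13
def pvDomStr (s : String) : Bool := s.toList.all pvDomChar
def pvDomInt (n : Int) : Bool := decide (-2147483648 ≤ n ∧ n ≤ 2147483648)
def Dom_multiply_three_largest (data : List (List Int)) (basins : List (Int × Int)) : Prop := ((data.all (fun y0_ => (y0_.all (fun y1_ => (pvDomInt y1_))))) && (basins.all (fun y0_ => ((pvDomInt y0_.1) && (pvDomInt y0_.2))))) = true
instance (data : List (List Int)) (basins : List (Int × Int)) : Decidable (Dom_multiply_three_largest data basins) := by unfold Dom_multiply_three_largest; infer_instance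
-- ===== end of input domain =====

-- B replaces A's recursive per-cell flood fill by a frontier-at-a-time (level) expansion, and
-- replaces A's sort + negative indexing by a running top-three accumulator updated per basin
-- (alternative decomposition, same cost).

-- ===== PORT A =====
-- A's neighbour list, the cell lookup data[i][j] (total via getD; Pre_ keeps every performed
-- lookup in range) and the guard of A's `if`.
def pvNbrs (x y : Int) : List (Int × Int) := [(x+1, y), (x-1, y), (x, y+1), (x, y-1)]

def pvCell (data : List (List Int)) (i j : Int) : Int :=
  PySem.List.pyGetD (PySem.List.pyGetD data i []) j 0

def pvCond (data : List (List Int)) (m n : Int) (v : PySem.Set (Int × Int)) (c : Int × Int) : Bool :=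
  decide (0 ≤ c.1 ∧ c.1 < m ∧ 0 ≤ c.2 ∧ c.2 < n) && !(PySem.Set.contains v c) && decide (pvCell data c.1 c.2 ≠ 9)

-- A's `def dfs(x,y)`: for each of the four neighbours, if the guard holds, add it to `visited`
-- and recurse; `visited` is A's closure variable, threaded here as the state.  The `fuel`
-- argument is a totality guard only: started at m*n+1 it can never run out.
def pvDfsA (data : List (List Int)) (m n : Int) : Nat → Int → Int → PySem.Set (Int × Int) → PySem.Set (Int × Int)
  | 0, _, _, v => v
  | fuel+1, x, y, v =>
    (pvNbrs x y).foldl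
      (fun w c => if pvCond data m n w c then pvDfsA data m n fuel c.1 c.2 (PySem.Set.add w c) else w) v

def multiply_three_largest (data : List (List Int)) (basins : List (Int × Int)) : Int :=
  let m : Int := (data.length : Int)
  let n : Int := ((PySem.List.pyGetD data 0 []).length : Int)
  let sizes : List Int := basins.foldl
    (fun sizes c =>
      sizes ++ [PySem.Set.len (pvDfsA data m n (m.toNat * n.toNat + 1) c.1 c.2 (PySem.Set.ofList [c]))]) []
  let sizes2 := PySem.List.sorted sizes (fun x => x) false
  PySem.List.pyGetD sizes2 (-1) 0 * PySem.List.pyGetD sizes2 (-2) 0 * PySem.List.pyGetD sizes2 (-3) 0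

-- ===== PORT B =====
-- B's inner `for i, j in (...)` over the four neighbours of one frontier cell: state is
-- (comp, nxt); an admissible neighbour is added to `comp` and appended to `nxt`.
def pvOkB (data : List (List Int)) (m n : Int) (comp : PySem.Set (Int × Int)) (i j : Int) : Bool :=
  decide (0 ≤ i) && decide (i < m) && decide (0 ≤ j) && decide (j < n) &&
  !(PySem.Set.contains comp (i, j)) &&
  !(PySem.List.pyGetD (PySem.List.pyGetD data i []) j 0 == 9)

def pvScanB (data : List (List Int)) (m n : Int)
    (acc : PySem.Set (Int × Int) × List (Int × Int)) (p : Int × Int) :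
    PySem.Set (Int × Int) × List (Int × Int) :=
  [(p.1+1, p.2), (p.1-1, p.2), (p.1, p.2+1), (p.1, p.2-1)].foldl
    (fun acc c => if pvOkB data m n acc.1 c.1 c.2 then (PySem.Set.add acc.1 c, acc.2 ++ [c]) else acc) acc

-- B's `while frontier:` loop: expand the whole frontier into `nxt`, then continue with it.
-- `fuel` is a totality guard only (m*n+1 can never run out).
def pvBfsB (data : List (List Int)) (m n : Int) : Nat → PySem.Set (Int × Int) → List (Int × Int) → PySem.Set (Int × Int)
  | 0, comp, _ => comp
  | fuel+1, comp, frontier =>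
    if frontier = [] then comp
    else
      let s := frontier.foldl (pvScanB data m n) (comp, [])
      pvBfsB data m n fuel s.1 s.2

-- B's running top-three accumulator `(a, b, c)` kept sorted ascending.
def pvTop3Step (t : Int × Int × Int) (s : Int) : Int × Int × Int :=
  if t.2.2 ≤ s then (t.2.1, t.2.2, s)
  else if t.2.1 ≤ s then (t.2.1, s, t.2.2)
  else if t.1 ≤ s then (s, t.2.1, t.2.2)
  else t

def multiply_three_largest_alt (data : List (List Int)) (basins : List (Int × Int)) : Int :=
  let m : Int := (data.length : Int)
  let n : Int := ((PySem.List.pyGetD data 0 []).length : Int)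
  let t := basins.foldl
    (fun t seed =>
      pvTop3Step t (PySem.Set.len
        (pvBfsB data m n (m.toNat * n.toNat + 1) (PySem.Set.ofList [seed]) [seed])))
    ((0 : Int), (0 : Int), (0 : Int))
  t.1 * t.2.1 * t.2.2

-- ===== PRECONDITION & SPEC =====
-- A raises IndexError on empty data (data[0]), on fewer than three basins (sizes[-3]) and, when
-- the fill reaches a cell missing from a short row, on ragged data; requiring every row to be at
-- least as long as row 0 also excludes some ragged inputs whose short rows the fill happens never
-- to reach (A returns there, and B returns the same value — see the cite in the claim).
def Pre_multiply_three_largest (data : List (List Int)) (basins : List (Int × Int)) : Prop :=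
  data ≠ [] ∧ (∀ row ∈ data, data.headI.length ≤ row.length) ∧ 3 ≤ basins.length
instance (data : List (List Int)) (basins : List (Int × Int)) : Decidable (Pre_multiply_three_largest data basins) := by
  unfold Pre_multiply_three_largest; infer_instance

def pvWitness_multiply_three_largest : List (List Int) × (List (Int × Int)) :=
  ([[9, 9], [9, 9]], [(0, 0), (0, 1), (1, 0)])

def Spec_multiply_three_largest (data : List (List Int)) (basins : List (Int × Int)) (out : Int) : Prop := out = multiply_three_largest_alt data basins
instance (data : List (List Int)) (basins : List (Int × Int)) (out : Int) : Decidable (Spec_multiply_three_largest data basins out) := by unfold Spec_multiply_three_largest; infer_instance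

-- ===== CLAIM (what is proved, stated in full; the proofs are below) =====
def Claim_equal_multiply_three_largest : Prop := ∀ (data : List (List Int)) (basins : List (Int × Int)), Dom_multiply_three_largest data basins → Pre_multiply_three_largest data basins → Spec_multiply_three_largest data basins (multiply_three_largest data basins)

-- ===== LEMMAS AND PROOFS =====

-- a cell is inside the grid
abbrev pvInb (m n : Int) (c : Int × Int) : Prop := 0 ≤ c.1 ∧ c.1 < m ∧ 0 ≤ c.2 ∧ c.2 < n

-- a cell the fill may enter: in bounds and not a 9
def pvGood (data : List (List Int)) (m n : Int) (c : Int × Int) : Prop :=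
  pvInb m n c ∧ pvCell data c.1 c.2 ≠ 9

-- reachability from a seed through good cells (the seed itself need not be good)
inductive pvReach (data : List (List Int)) (m n : Int) : (Int × Int) → (Int × Int) → Prop
  | refl (a : Int × Int) : pvReach data m n a a
  | step {a b c : Int × Int} : pvReach data m n a b → c ∈ pvNbrs b.1 b.2 →
      pvGood data m n c → pvReach data m n a c

theorem pvReach_trans {data : List (List Int)} {m n : Int} {a b c : Int × Int}
    (h1 : pvReach data m n a b) (h2 : pvReach data m n b c) : pvReach data m n a c := by
  induction h2 with
  | refl => exact h1
  | step _ hmem hg ih => exact pvReach.step ih hmem hg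

def pvInbCount (m n : Int) (v : List (Int × Int)) : Nat :=
  (v.filter (fun c => decide (pvInb m n c))).length

theorem pvInbCount_le (m n : Int) (v : List (Int × Int)) (hv : v.Nodup) :
    pvInbCount m n v ≤ m.toNat * n.toNat := by
  have hn : (v.filter (fun c => decide (pvInb m n c))).Nodup := hv.filter _
  have hmem : ∀ c ∈ v.filter (fun c => decide (pvInb m n c)), pvInb m n c := by
    intro c hc
    simpa using (List.of_mem_filter hc)
  have hmap : ((v.filter (fun c => decide (pvInb m n c))).map
      (fun c => (c.1.toNat, c.2.toNat))).Nodup := by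
    refine hn.map_on ?_
    intro x hx y hy hxy
    have hx' := hmem x hx
    have hy' := hmem y hy
    have h1 : x.1 = y.1 := by
      have := congrArg Prod.fst hxy
      simp at this
      omega
    have h2 : x.2 = y.2 := by
      have := congrArg Prod.snd hxy
      simp at this
      omega
    exact Prod.ext h1 h2
  have hsub : ((v.filter (fun c => decide (pvInb m n c))).map
      (fun c => (c.1.toNat, c.2.toNat))).toFinset ⊆ Finset.range m.toNat ×ˢ Finset.range n.toNat := by
    intro p hp
    simp only [List.mem_toFinset, List.mem_map] at hp
    obtain ⟨c, hc, rfl⟩ := hp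
    have := hmem c hc
    simp only [Finset.mem_product, Finset.mem_range]
    omega
  have hcard := Finset.card_le_card hsub
  rw [List.toFinset_card_of_nodup hmap] at hcard
  simpa [pvInbCount, Finset.card_product] using hcard

theorem pvCond_true_iff {data : List (List Int)} {m n : Int} {v : PySem.Set (Int × Int)} {c : Int × Int} :
    pvCond data m n v c = true ↔ (pvGood data m n c ∧ c ∉ v) := by
  simp [pvCond, pvGood, pvInb]
  tauto

theorem pvAdd_not_mem {v : PySem.Set (Int × Int)} {c : Int × Int} (h : c ∉ v) :
    PySem.Set.add v c = v ++ [c] := by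
  simp [PySem.Set.add, h]

theorem pvInbCount_append (m n : Int) (v t : List (Int × Int)) :
    pvInbCount m n (v ++ t) = pvInbCount m n v + pvInbCount m n t := by
  simp [pvInbCount, List.filter_append]

-- ---------- A side ----------

theorem pvDfsA_extend (data : List (List Int)) (m n : Int) :
    ∀ (fuel : Nat) (x y : Int) (v : PySem.Set (Int × Int)),
      ∃ t, pvDfsA data m n fuel x y v = v ++ t := by
  intro fuel
  induction fuel with
  | zero => exact fun x y v => ⟨[], by simp [pvDfsA]⟩
  | succ f ih =>
    intro x y v
    simp only [pvDfsA]
    generalize pvNbrs x y = cs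
    induction cs generalizing v with
    | nil => exact ⟨[], by simp⟩
    | cons c cs ihc =>
      simp only [List.foldl_cons]
      by_cases hc : pvCond data m n v c = true
      · rw [if_pos hc]
        have hnm : c ∉ v := (pvCond_true_iff.mp hc).2
        rw [pvAdd_not_mem hnm]
        obtain ⟨t0, h0⟩ := ih c.1 c.2 (v ++ [c])
        obtain ⟨t1, h1⟩ := ihc (pvDfsA data m n f c.1 c.2 (v ++ [c]))
        exact ⟨[c] ++ t0 ++ t1, by rw [h1, h0]; simp⟩
      · rw [if_neg hc]
        exact ihc v

theorem pvDfsA_nodup (data : List (List Int)) (m n : Int) :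
    ∀ (fuel : Nat) (x y : Int) (v : PySem.Set (Int × Int)), v.Nodup →
      (pvDfsA data m n fuel x y v).Nodup := by
  intro fuel
  induction fuel with
  | zero => exact fun x y v h => h
  | succ f ih =>
    intro x y v hv
    simp only [pvDfsA]
    generalize pvNbrs x y = cs
    induction cs generalizing v with
    | nil => exact hv
    | cons c cs ihc =>
      simp only [List.foldl_cons]
      by_cases hc : pvCond data m n v c = true
      · rw [if_pos hc]
        exact ihc _ (ih _ _ _ (PySem.Set.nodup_add v c hv))
      · rw [if_neg hc]
        exact ihc _ hv

theorem pvDfsA_sound (data : List (List Int)) (m n : Int) :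
    ∀ (fuel : Nat) (x y : Int) (v : PySem.Set (Int × Int)) (c : Int × Int),
      c ∈ pvDfsA data m n fuel x y v → c ∈ v ∨ pvReach data m n (x, y) c := by
  intro fuel
  induction fuel with
  | zero => intro x y v c h; exact Or.inl h
  | succ f ih =>
    intro x y v c h
    simp only [pvDfsA] at h
    have aux : ∀ (cs : List (Int × Int)), (∀ e ∈ cs, e ∈ pvNbrs x y) →
        ∀ (v : PySem.Set (Int × Int)),
        c ∈ cs.foldl (fun w c => if pvCond data m n w c then
            pvDfsA data m n f c.1 c.2 (PySem.Set.add w c) else w) v →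
        c ∈ v ∨ pvReach data m n (x, y) c := by
      intro cs
      induction cs with
      | nil => intro _ v h; exact Or.inl h
      | cons e cs ihc =>
        intro hsub v h
        simp only [List.foldl_cons] at h
        by_cases he : pvCond data m n v e = true
        · rw [if_pos he] at h
          obtain ⟨hg, hnm⟩ := pvCond_true_iff.mp he
          have hre : pvReach data m n (x, y) e :=
            pvReach.step (pvReach.refl (x, y)) (hsub e (by simp)) hg
          rcases ihc (fun d hd => hsub d (by simp [hd])) _ h with h' | h'
          · rcases ih e.1 e.2 _ c h' with h'' | h''
            · rw [pvAdd_not_mem hnm] at h''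
              rcases List.mem_append.mp h'' with h3 | h3
              · exact Or.inl h3
              · simp at h3
                subst h3
                exact Or.inr hre
            · exact Or.inr (pvReach_trans hre h'')
          · exact Or.inr h'
        · rw [if_neg he] at h
          exact ihc (fun d hd => hsub d (by simp [hd])) _ h
    exact aux (pvNbrs x y) (fun _ h => h) v h

theorem pvMem_ext {w X : List (Int × Int)} (h : ∃ t, X = w ++ t) {c : Int × Int}
    (hc : c ∈ w) : c ∈ X := by
  obtain ⟨t, rfl⟩ := h
  exact List.mem_append_left _ hc

theorem pvCond_false_good {data : List (List Int)} {m n : Int} {v : PySem.Set (Int × Int)}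
    {c : Int × Int} (h : ¬ pvCond data m n v c = true) (hg : pvGood data m n c) : c ∈ v := by
  simp [pvCond, pvGood, pvInb] at h hg
  tauto

theorem pvFoldA_extend (data : List (List Int)) (m n : Int) (f : Nat) :
    ∀ (cs : List (Int × Int)) (w : PySem.Set (Int × Int)),
      ∃ t, cs.foldl (fun w c => if pvCond data m n w c then
          pvDfsA data m n f c.1 c.2 (PySem.Set.add w c) else w) w = w ++ t := by
  intro cs
  induction cs with
  | nil => exact fun w => ⟨[], by simp⟩
  | cons e cs ihc =>
    intro w
    simp only [List.foldl_cons]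
    by_cases he : pvCond data m n w e = true
    · rw [if_pos he]
      rw [pvAdd_not_mem (pvCond_true_iff.mp he).2]
      obtain ⟨t0, h0⟩ := pvDfsA_extend data m n f e.1 e.2 (w ++ [e])
      obtain ⟨t1, h1⟩ := ihc (pvDfsA data m n f e.1 e.2 (w ++ [e]))
      exact ⟨[e] ++ t0 ++ t1, by rw [h1, h0]; simp⟩
    · rw [if_neg he]
      exact ihc w

theorem pvInbCount_of_extend {m n : Int} {w X : List (Int × Int)} (h : ∃ t, X = w ++ t) :
    pvInbCount m n w ≤ pvInbCount m n X := by
  obtain ⟨t, rfl⟩ := h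
  simp [pvInbCount_append]

theorem pvDfsA_closure (data : List (List Int)) (m n : Int) :
    ∀ (fuel : Nat) (x y : Int) (v : PySem.Set (Int × Int)), v.Nodup →
      m.toNat * n.toNat + 1 ≤ fuel + pvInbCount m n v →
      (∀ c ∈ pvNbrs x y, pvGood data m n c → c ∈ pvDfsA data m n fuel x y v) ∧
      (∀ c ∈ pvDfsA data m n fuel x y v, c ∉ v →
        ∀ d ∈ pvNbrs c.1 c.2, pvGood data m n d → d ∈ pvDfsA data m n fuel x y v) := by
  intro fuel
  induction fuel with
  | zero =>
    intro x y v hv hb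
    have := pvInbCount_le m n v hv
    omega
  | succ f ih =>
    intro x y v hv hb
    simp only [pvDfsA]
    have aux : ∀ (cs : List (Int × Int)), (∀ e ∈ cs, e ∈ pvNbrs x y) →
        ∀ (w : PySem.Set (Int × Int)), w.Nodup → pvInbCount m n v ≤ pvInbCount m n w →
        (∀ c ∈ cs, pvGood data m n c → c ∈ cs.foldl (fun w c => if pvCond data m n w c then
            pvDfsA data m n f c.1 c.2 (PySem.Set.add w c) else w) w) ∧
        (∀ c ∈ cs.foldl (fun w c => if pvCond data m n w c then
            pvDfsA data m n f c.1 c.2 (PySem.Set.add w c) else w) w, c ∉ w →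
          ∀ d ∈ pvNbrs c.1 c.2, pvGood data m n d →
            d ∈ cs.foldl (fun w c => if pvCond data m n w c then
              pvDfsA data m n f c.1 c.2 (PySem.Set.add w c) else w) w) := by
      intro cs
      induction cs with
      | nil =>
        intro _ w _ _
        refine ⟨by simp, ?_⟩
        intro c hc hnc
        exact absurd hc hnc
      | cons e cs ihc =>
        intro hsub w hw hwb
        simp only [List.foldl_cons]
        by_cases he : pvCond data m n w e = true
        · rw [if_pos he]
          obtain ⟨hge, hnm⟩ := pvCond_true_iff.mp he
          rw [pvAdd_not_mem hnm]
          have hwe_nodup : (w ++ [e]).Nodup := by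
            rw [← pvAdd_not_mem hnm]
            exact PySem.Set.nodup_add w e hw
          have hwe_inb : pvInbCount m n (w ++ [e]) = pvInbCount m n w + 1 := by
            have : pvInb m n e := hge.1
            simp [pvInbCount, this]
          have hw1n : (pvDfsA data m n f e.1 e.2 (w ++ [e])).Nodup :=
            pvDfsA_nodup data m n f e.1 e.2 _ hwe_nodup
          have hext1 : ∃ t, pvDfsA data m n f e.1 e.2 (w ++ [e]) = (w ++ [e]) ++ t :=
            pvDfsA_extend data m n f e.1 e.2 _
          have hw1b : pvInbCount m n v ≤ pvInbCount m n (pvDfsA data m n f e.1 e.2 (w ++ [e])) := by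
            have := pvInbCount_of_extend (m := m) (n := n) hext1
            omega
          have hIH := ih e.1 e.2 (w ++ [e]) hwe_nodup (by omega)
          obtain ⟨P1, P2⟩ := hIH
          obtain ⟨Q1, Q2⟩ := ihc (fun d hd => hsub d (by simp [hd])) _ hw1n hw1b
          have hextF : ∃ t, cs.foldl (fun w c => if pvCond data m n w c then
              pvDfsA data m n f c.1 c.2 (PySem.Set.add w c) else w)
              (pvDfsA data m n f e.1 e.2 (w ++ [e]))
              = pvDfsA data m n f e.1 e.2 (w ++ [e]) ++ t :=
            pvFoldA_extend data m n f cs _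
          constructor
          · intro c hc hg
            rcases List.mem_cons.mp hc with rfl | hc
            · exact pvMem_ext hextF (pvMem_ext hext1 (by simp))
            · exact Q1 c hc hg
          · intro c hcF hcw d hd hgd
            by_cases hc1 : c ∈ pvDfsA data m n f e.1 e.2 (w ++ [e])
            · by_cases hc2 : c ∈ w ++ [e]
              · have hce : c = e := by
                  rcases List.mem_append.mp hc2 with h' | h'
                  · exact absurd h' hcw
                  · simpa using h'
                subst hce
                exact pvMem_ext hextF (P1 d hd hgd)
              · exact pvMem_ext hextF (P2 c hc1 hc2 d hd hgd)
            · exact Q2 c hcF hc1 d hd hgd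
        · rw [if_neg he]
          obtain ⟨Q1, Q2⟩ := ihc (fun d hd => hsub d (by simp [hd])) w hw hwb
          constructor
          · intro c hc hg
            rcases List.mem_cons.mp hc with rfl | hc
            · exact pvMem_ext (pvFoldA_extend data m n f cs w) (pvCond_false_good he hg)
            · exact Q1 c hc hg
          · exact Q2
    exact aux (pvNbrs x y) (fun _ h => h) v hv le_rfl

theorem pvDfsA_mem_iff (data : List (List Int)) (m n : Int) (s c : Int × Int) :
    c ∈ pvDfsA data m n (m.toNat * n.toNat + 1) s.1 s.2 (PySem.Set.ofList [s]) ↔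
      pvReach data m n s c := by
  have hofs : (PySem.Set.ofList [s] : PySem.Set (Int × Int)) = [s] := rfl
  rw [hofs]
  constructor
  · intro h
    rcases pvDfsA_sound data m n _ s.1 s.2 [s] c h with h' | h'
    · simp at h'
      subst h'
      exact pvReach.refl c
    · exact h'
  · intro h
    obtain ⟨C1, C2⟩ := pvDfsA_closure data m n (m.toNat * n.toNat + 1) s.1 s.2 [s]
      (List.nodup_singleton s) (by omega)
    induction h with
    | refl => exact pvMem_ext (pvDfsA_extend data m n _ s.1 s.2 [s]) (by simp)
    | step hr hmem hg ihr =>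
      rename_i b c'
      by_cases hb : b ∈ ([s] : List (Int × Int))
      · have hbs : b = s := by simpa using hb
        subst hbs
        exact C1 c' hmem hg
      · exact C2 b ihr hb c' hmem hg

-- ---------- B side: the frontier expansion ----------

theorem pvOkB_eq_pvCond (data : List (List Int)) (m n : Int) (v : PySem.Set (Int × Int))
    (c : Int × Int) : pvOkB data m n v c.1 c.2 = pvCond data m n v c := by
  rw [Bool.eq_iff_iff]
  simp [pvOkB, pvCond, pvCell]
  tauto

theorem pvScanB_eq (data : List (List Int)) (m n : Int)
    (acc : PySem.Set (Int × Int) × List (Int × Int)) (p : Int × Int) :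
    pvScanB data m n acc p = (pvNbrs p.1 p.2).foldl
      (fun acc c => if pvCond data m n acc.1 c then (PySem.Set.add acc.1 c, acc.2 ++ [c]) else acc) acc := by
  simp only [pvScanB, pvNbrs, pvOkB_eq_pvCond]

theorem pvScanB_facts (data : List (List Int)) (m n : Int) (p : Int × Int) :
    ∀ (v : PySem.Set (Int × Int)) (st : List (Int × Int)), v.Nodup →
      ∃ t, pvScanB data m n (v, st) p = (v ++ t, st ++ t) ∧ (v ++ t).Nodup ∧
          (∀ c ∈ t, c ∈ pvNbrs p.1 p.2 ∧ pvGood data m n c) ∧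
          (∀ c ∈ pvNbrs p.1 p.2, pvGood data m n c → c ∈ v ++ t) := by
  have gen : ∀ (cs : List (Int × Int)) (v : PySem.Set (Int × Int)) (st : List (Int × Int)), v.Nodup →
      ∃ t, cs.foldl (fun acc c => if pvCond data m n acc.1 c then
              (PySem.Set.add acc.1 c, acc.2 ++ [c]) else acc) (v, st) = (v ++ t, st ++ t) ∧
          (v ++ t).Nodup ∧
          (∀ c ∈ t, c ∈ cs ∧ pvGood data m n c) ∧
          (∀ c ∈ cs, pvGood data m n c → c ∈ v ++ t) := by
    intro cs
    induction cs with
    | nil =>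
      intro v st hv
      exact ⟨[], by simp, by simpa using hv, by simp, by simp⟩
    | cons e cs ihc =>
      intro v st hv
      simp only [List.foldl_cons]
      by_cases he : pvCond data m n v e = true
      · rw [if_pos he]
        obtain ⟨hge, hnm⟩ := pvCond_true_iff.mp he
        rw [pvAdd_not_mem hnm]
        have hvn : (v ++ [e]).Nodup := by
          rw [← pvAdd_not_mem hnm]
          exact PySem.Set.nodup_add v e hv
        obtain ⟨t', h1, h2, h3, h4⟩ := ihc (v ++ [e]) (st ++ [e]) hvn
        refine ⟨e :: t', by simpa using h1, by simpa using h2, ?_, ?_⟩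
        · intro c hc
          rcases List.mem_cons.mp hc with rfl | hc
          · exact ⟨by simp, hge⟩
          · exact ⟨by simp [(h3 c hc).1], (h3 c hc).2⟩
        · intro c hc hg
          rcases List.mem_cons.mp hc with rfl | hc
          · simp
          · simpa using h4 c hc hg
      · rw [if_neg he]
        obtain ⟨t', h1, h2, h3, h4⟩ := ihc v st hv
        refine ⟨t', h1, h2, fun c hc => ⟨by simp [(h3 c hc).1], (h3 c hc).2⟩, ?_⟩
        intro c hc hg
        rcases List.mem_cons.mp hc with rfl | hc
        · exact List.mem_append_left _ (pvCond_false_good he hg)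
        · exact h4 c hc hg
  intro v st hv
  rw [pvScanB_eq]
  exact gen (pvNbrs p.1 p.2) v st hv

theorem pvFrontB_facts (data : List (List Int)) (m n : Int) :
    ∀ (fr : List (Int × Int)) (v : PySem.Set (Int × Int)) (st : List (Int × Int)), v.Nodup →
      ∃ T, fr.foldl (pvScanB data m n) (v, st) = (v ++ T, st ++ T) ∧ (v ++ T).Nodup ∧
          (∀ c ∈ T, pvGood data m n c ∧ ∃ p ∈ fr, c ∈ pvNbrs p.1 p.2) ∧
          (∀ p ∈ fr, ∀ c ∈ pvNbrs p.1 p.2, pvGood data m n c → c ∈ v ++ T) := by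
  intro fr
  induction fr with
  | nil =>
    intro v st hv
    exact ⟨[], by simp, by simpa using hv, by simp, by simp⟩
  | cons p fr ih =>
    intro v st hv
    simp only [List.foldl_cons]
    obtain ⟨t0, h1, h2, h3, h4⟩ := pvScanB_facts data m n p v st hv
    rw [h1]
    obtain ⟨T', g1, g2, g3, g4⟩ := ih (v ++ t0) (st ++ t0) h2
    refine ⟨t0 ++ T', by simpa using g1, by simpa using g2, ?_, ?_⟩
    · intro c hc
      rcases List.mem_append.mp hc with hc | hc
      · exact ⟨(h3 c hc).2, p, by simp, (h3 c hc).1⟩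
      · obtain ⟨hg, q, hq, hn⟩ := g3 c hc
        exact ⟨hg, q, by simp [hq], hn⟩
    · intro q hq c hc hg
      rcases List.mem_cons.mp hq with rfl | hq
      · have := h4 c hc hg
        rcases List.mem_append.mp this with h' | h'
        · simpa using Or.inl h'
        · simp [h']
      · simpa using g4 q hq c hc hg

theorem pvBfsB_nil (data : List (List Int)) (m n : Int) (f : Nat) (v : PySem.Set (Int × Int)) :
    pvBfsB data m n f v [] = v := by
  cases f <;> simp [pvBfsB]

theorem pvBfsB_extend (data : List (List Int)) (m n : Int) :
    ∀ (fuel : Nat) (v : PySem.Set (Int × Int)) (fr : List (Int × Int)), v.Nodup →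
      ∃ t, pvBfsB data m n fuel v fr = v ++ t ∧ (v ++ t).Nodup := by
  intro fuel
  induction fuel with
  | zero =>
    intro v fr hv
    exact ⟨[], by simp [pvBfsB], by simpa using hv⟩
  | succ f ih =>
    intro v fr hv
    by_cases hfr : fr = []
    · subst hfr
      exact ⟨[], by simp [pvBfsB], by simpa using hv⟩
    · obtain ⟨T, h1, h2, _, _⟩ := pvFrontB_facts data m n fr v [] hv
      simp only [List.nil_append] at h1
      obtain ⟨t1, g1, g2⟩ := ih (v ++ T) T h2
      refine ⟨T ++ t1, ?_, by simpa using g2⟩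
      simp only [pvBfsB, if_neg hfr, h1]
      rw [g1]
      simp

theorem pvBfsB_sound (data : List (List Int)) (m n : Int) :
    ∀ (fuel : Nat) (v : PySem.Set (Int × Int)) (fr : List (Int × Int)), v.Nodup →
      ∀ c ∈ pvBfsB data m n fuel v fr, c ∈ v ∨ ∃ p ∈ fr, pvReach data m n p c := by
  intro fuel
  induction fuel with
  | zero => intro v fr _ c h; exact Or.inl (by simpa [pvBfsB] using h)
  | succ f ih =>
    intro v fr hv c h
    by_cases hfr : fr = []
    · subst hfr
      exact Or.inl (by simpa [pvBfsB] using h)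
    · obtain ⟨T, h1, h2, h3, _⟩ := pvFrontB_facts data m n fr v [] hv
      simp only [List.nil_append] at h1
      simp only [pvBfsB, if_neg hfr, h1] at h
      have hreach : ∀ q ∈ T, ∃ p ∈ fr, pvReach data m n p q := by
        intro q hq
        obtain ⟨hg, p, hp, hn⟩ := h3 q hq
        exact ⟨p, hp, pvReach.step (pvReach.refl p) hn hg⟩
      rcases ih (v ++ T) T h2 c h with h' | ⟨p', hp', hr'⟩
      · rcases List.mem_append.mp h' with h'' | h''
        · exact Or.inl h''
        · exact Or.inr (hreach c h'')
      · obtain ⟨p, hp, hr⟩ := hreach p' hp'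
        exact Or.inr ⟨p, hp, pvReach_trans hr hr'⟩

theorem pvBfsB_closed (data : List (List Int)) (m n : Int) :
    ∀ (fuel : Nat) (v : PySem.Set (Int × Int)) (fr : List (Int × Int)), v.Nodup →
      m.toNat * n.toNat + 1 ≤ fuel + pvInbCount m n v →
      (∀ c ∈ v, c ∈ fr ∨ ∀ d ∈ pvNbrs c.1 c.2, pvGood data m n d → d ∈ v) →
      ∀ c ∈ pvBfsB data m n fuel v fr, ∀ d ∈ pvNbrs c.1 c.2, pvGood data m n d →
        d ∈ pvBfsB data m n fuel v fr := by
  intro fuel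
  induction fuel with
  | zero =>
    intro v fr hv hb _ _ _ _ _ _
    have := pvInbCount_le m n v hv
    omega
  | succ f ih =>
    intro v fr hv hb hcl c hc d hd hgd
    by_cases hfr : fr = []
    · subst hfr
      rw [pvBfsB_nil] at hc ⊢
      rcases hcl c hc with h' | h'
      · exact absurd h' (by simp)
      · exact h' d hd hgd
    · obtain ⟨T, h1, h2, h3, h4⟩ := pvFrontB_facts data m n fr v [] hv
      simp only [List.nil_append] at h1
      simp only [pvBfsB, if_neg hfr, h1] at hc ⊢
      by_cases hT : T = []
      · subst hT
        rw [List.append_nil] at hc h2 ⊢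
        rw [pvBfsB_nil] at hc ⊢
        rcases hcl c hc with h' | h'
        · simpa using h4 c h' d hd hgd
        · exact h' d hd hgd
      · have hTinb : pvInbCount m n T = T.length := by
          unfold pvInbCount
          rw [List.filter_eq_self.mpr]
          intro a ha
          simpa using ((h3 a ha).1).1
        have hb' : m.toNat * n.toNat + 1 ≤ f + pvInbCount m n (v ++ T) := by
          rw [pvInbCount_append]
          have : 1 ≤ T.length := List.length_pos_iff.mpr hT
          omega
        have hcl' : ∀ c ∈ v ++ T, c ∈ T ∨
            ∀ d ∈ pvNbrs c.1 c.2, pvGood data m n d → d ∈ v ++ T := by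
          intro c hc
          rcases List.mem_append.mp hc with h' | h'
          · rcases hcl c h' with h'' | h''
            · exact Or.inr (fun d hd hgd => h4 c h'' d hd hgd)
            · exact Or.inr (fun d hd hgd => List.mem_append_left _ (h'' d hd hgd))
          · exact Or.inl h'
        exact ih (v ++ T) T h2 hb' hcl' c hc d hd hgd

theorem pvBfsB_mem_iff (data : List (List Int)) (m n : Int) (s c : Int × Int) :
    c ∈ pvBfsB data m n (m.toNat * n.toNat + 1) (PySem.Set.ofList [s]) [s] ↔
      pvReach data m n s c := by
  have hofs : (PySem.Set.ofList [s] : PySem.Set (Int × Int)) = [s] := rfl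
  rw [hofs]
  constructor
  · intro h
    rcases pvBfsB_sound data m n _ [s] [s] (List.nodup_singleton s) c h with h' | ⟨p, hp, hr⟩
    · simp at h'
      subst h'
      exact pvReach.refl c
    · have hps : p = s := by simpa using hp
      subst hps
      exact hr
  · intro h
    have hcl := pvBfsB_closed data m n (m.toNat * n.toNat + 1) [s] [s]
      (List.nodup_singleton s) (by omega) (fun c hc => Or.inl (by simpa using hc))
    have hs : s ∈ pvBfsB data m n (m.toNat * n.toNat + 1) [s] [s] := by
      obtain ⟨t, he, _⟩ := pvBfsB_extend data m n _ [s] [s] (List.nodup_singleton s)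
      rw [he]
      simp
    induction h with
    | refl => exact hs
    | step hr hmem hg ihr => exact hcl _ ihr _ hmem hg

-- ---------- the per-seed size is the same ----------

theorem pvSeed_eq (data : List (List Int)) (m n : Int) (s : Int × Int) :
    PySem.Set.len (pvDfsA data m n (m.toNat * n.toNat + 1) s.1 s.2 (PySem.Set.ofList [s])) =
    PySem.Set.len (pvBfsB data m n (m.toNat * n.toNat + 1) (PySem.Set.ofList [s]) [s]) := by
  have hA : (pvDfsA data m n (m.toNat * n.toNat + 1) s.1 s.2 (PySem.Set.ofList [s])).Nodup :=
    pvDfsA_nodup data m n _ s.1 s.2 _ (PySem.Set.nodup_ofList [s])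
  have hB : (pvBfsB data m n (m.toNat * n.toNat + 1) (PySem.Set.ofList [s]) [s]).Nodup := by
    obtain ⟨t, he, hn⟩ := pvBfsB_extend data m n (m.toNat * n.toNat + 1)
      (PySem.Set.ofList [s]) [s] (PySem.Set.nodup_ofList [s])
    rw [he]
    exact hn
  have hperm := (List.perm_ext_iff_of_nodup hA hB).mpr
    (fun c => by rw [pvDfsA_mem_iff, pvBfsB_mem_iff])
  unfold PySem.Set.len
  rw [hperm.length_eq]

-- ---------- the top-three accumulator vs sort + negative indexing ----------

def pvSorted3 (t : Int × Int × Int) : Prop := t.1 ≤ t.2.1 ∧ t.2.1 ≤ t.2.2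

theorem pvTop3Step_sorted {t : Int × Int × Int} (h : pvSorted3 t) (s : Int) :
    pvSorted3 (pvTop3Step t s) := by
  rcases t with ⟨a, b, c⟩
  simp only [pvSorted3, pvTop3Step] at *
  split_ifs <;> simp_all <;> omega

theorem pvTop3Step_comm {t : Int × Int × Int} (h : pvSorted3 t) (x y : Int) :
    pvTop3Step (pvTop3Step t x) y = pvTop3Step (pvTop3Step t y) x := by
  rcases t with ⟨a, b, c⟩
  simp only [pvSorted3] at h
  simp only [pvTop3Step]
  split_ifs <;> simp_all [Prod.mk.injEq] <;> omega

theorem pvTop3_foldl_perm {l₁ l₂ : List Int} (hp : l₁.Perm l₂) :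
    ∀ t : Int × Int × Int, pvSorted3 t → l₁.foldl pvTop3Step t = l₂.foldl pvTop3Step t := by
  induction hp with
  | nil => intro t _; rfl
  | cons x _ ih =>
    intro t ht
    simp only [List.foldl_cons]
    exact ih _ (pvTop3Step_sorted ht x)
  | swap x y l =>
    intro t ht
    simp only [List.foldl_cons]
    rw [pvTop3Step_comm ht]
  | trans _ _ ih1 ih2 =>
    intro t ht
    rw [ih1 t ht, ih2 t ht]

def pvRget (k : Nat) (S : List Int) : Int := S.reverse.getD k 0

theorem pvRget_zero_le {S : List Int} {x : Int} (hx : 0 ≤ x) (hle : ∀ e ∈ S, e ≤ x) :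
    pvRget 0 S ≤ x := by
  unfold pvRget
  cases hS : S.reverse with
  | nil => simpa using hx
  | cons h t =>
    have : h ∈ S := by
      have : h ∈ S.reverse := by rw [hS]; simp
      simpa using this
    simpa using hle h this

theorem pvFold_top3 : ∀ S : List Int, S.Pairwise (· ≤ ·) → (∀ e ∈ S, 0 ≤ e) →
    S.foldl pvTop3Step ((0 : Int), (0 : Int), (0 : Int)) = (pvRget 2 S, pvRget 1 S, pvRget 0 S) := by
  intro S
  induction S using List.reverseRecOn with
  | nil => intro _ _; rfl
  | append_singleton S x ih =>
    intro hpw hnn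
    have hS : S.Pairwise (· ≤ ·) := (List.pairwise_append.mp hpw).1
    have hle : ∀ e ∈ S, e ≤ x := by
      intro e he
      exact (List.pairwise_append.mp hpw).2.2 e he x (by simp)
    have hnnS : ∀ e ∈ S, 0 ≤ e := fun e he => hnn e (by simp [he])
    have hx : 0 ≤ x := hnn x (by simp)
    rw [List.foldl_append, ih hS hnnS]
    have hc : pvRget 0 S ≤ x := pvRget_zero_le hx hle
    simp only [List.foldl_cons, List.foldl_nil]
    rw [pvTop3Step]
    rw [if_pos hc]
    unfold pvRget
    simp

-- the per-seed size functions with m, n instantiated as both ports compute them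
def pvSizeA (data : List (List Int)) (c : Int × Int) : Int :=
  PySem.Set.len (pvDfsA data (data.length : Int) ((PySem.List.pyGetD data 0 []).length : Int)
    ((data.length : Int).toNat * ((PySem.List.pyGetD data 0 []).length : Int).toNat + 1)
    c.1 c.2 (PySem.Set.ofList [c]))

def pvSizeB (data : List (List Int)) (seed : Int × Int) : Int :=
  PySem.Set.len (pvBfsB data (data.length : Int) ((PySem.List.pyGetD data 0 []).length : Int)
    ((data.length : Int).toNat * ((PySem.List.pyGetD data 0 []).length : Int).toNat + 1)
    (PySem.Set.ofList [seed]) [seed])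

theorem pvA_unfold (data : List (List Int)) (basins : List (Int × Int)) :
    multiply_three_largest data basins =
      PySem.List.pyGetD (PySem.List.sorted
        (basins.foldl (fun sizes c => sizes ++ [pvSizeA data c]) []) (fun x => x) false) (-1) 0 *
      PySem.List.pyGetD (PySem.List.sorted
        (basins.foldl (fun sizes c => sizes ++ [pvSizeA data c]) []) (fun x => x) false) (-2) 0 *
      PySem.List.pyGetD (PySem.List.sorted
        (basins.foldl (fun sizes c => sizes ++ [pvSizeA data c]) []) (fun x => x) false) (-3) 0 := rfl

theorem pvB_unfold (data : List (List Int)) (basins : List (Int × Int)) :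
    multiply_three_largest_alt data basins =
      (basins.foldl (fun t seed => pvTop3Step t (pvSizeB data seed)) ((0:Int),(0:Int),(0:Int))).1 *
      (basins.foldl (fun t seed => pvTop3Step t (pvSizeB data seed)) ((0:Int),(0:Int),(0:Int))).2.1 *
      (basins.foldl (fun t seed => pvTop3Step t (pvSizeB data seed)) ((0:Int),(0:Int),(0:Int))).2.2 := rfl

-- ===== VERDICT helper =====
theorem pvMain (data : List (List Int)) (basins : List (Int × Int))
    (hb : 3 ≤ basins.length) :
    multiply_three_largest data basins = multiply_three_largest_alt data basins := by
  rw [pvA_unfold, pvB_unfold]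
  have hsz : ∀ c : Int × Int, pvSizeB data c = pvSizeA data c := by
    intro c
    unfold pvSizeA pvSizeB
    exact (pvSeed_eq data _ _ c).symm
  have hBfold : basins.foldl (fun t seed => pvTop3Step t (pvSizeB data seed)) ((0:Int),(0:Int),(0:Int))
      = (basins.map (pvSizeA data)).foldl pvTop3Step ((0:Int),(0:Int),(0:Int)) := by
    rw [List.foldl_map]
    simp only [hsz]
  have hsizes : basins.foldl (fun sizes c => sizes ++ [pvSizeA data c]) []
      = basins.map (pvSizeA data) := by
    simpa using PySem.List.foldl_append_singleton_eq_map (pvSizeA data) basins []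
  rw [hBfold, hsizes]
  set L : List Int := basins.map (pvSizeA data) with hL
  set S : List Int := PySem.List.sorted L (fun x => x) false with hS
  have hperm : S.Perm L := PySem.List.sorted_perm L (fun x => x) false
  have hpw : S.Pairwise (· ≤ ·) := by
    simpa using PySem.List.sorted_pairwise L (fun x => x)
  have hnnL : ∀ e ∈ L, 0 ≤ e := by
    intro e he
    rw [hL] at he
    obtain ⟨c, _, rfl⟩ := List.mem_map.mp he
    unfold pvSizeA PySem.Set.len
    positivity
  have hnnS : ∀ e ∈ S, 0 ≤ e := fun e he => hnnL e (hperm.mem_iff.mp he)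
  have hlen : 3 ≤ S.length := by
    rw [hperm.length_eq, hL, List.length_map]
    exact hb
  have hfold : L.foldl pvTop3Step ((0:Int),(0:Int),(0:Int))
      = (pvRget 2 S, pvRget 1 S, pvRget 0 S) := by
    rw [pvTop3_foldl_perm hperm.symm ((0:Int),(0:Int),(0:Int)) (by constructor <;> simp)]
    exact pvFold_top3 S hpw hnnS
  have e1 : PySem.List.pyGetD S (-1) 0 = pvRget 0 S := by
    rw [PySem.List.pyGetD_neg_ofNat S 1 0 (by omega) (by omega)]
    unfold pvRget
    rw [List.getD_eq_getElem _ _ (by simp; omega), List.getElem_reverse]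
    simp
  have e2 : PySem.List.pyGetD S (-2) 0 = pvRget 1 S := by
    rw [PySem.List.pyGetD_neg_ofNat S 2 0 (by omega) (by omega)]
    unfold pvRget
    rw [List.getD_eq_getElem _ _ (by simp; omega), List.getElem_reverse]
    simp only [show S.length - 1 - 1 = S.length - 2 from by omega]
  have e3 : PySem.List.pyGetD S (-3) 0 = pvRget 2 S := by
    rw [PySem.List.pyGetD_neg_ofNat S 3 0 (by omega) (by omega)]
    unfold pvRget
    rw [List.getD_eq_getElem _ _ (by simp; omega), List.getElem_reverse]
    simp only [show S.length - 1 - 2 = S.length - 3 from by omega]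
  rw [e1, e2, e3, hfold]
  show pvRget 0 S * pvRget 1 S * pvRget 2 S = pvRget 2 S * pvRget 1 S * pvRget 0 S
  ring

-- ===== VERDICT (by name: the statement is the Claim_ definition above) =====
theorem multiply_three_largest_spec : Claim_equal_multiply_three_largest := by
  intro data basins _ hpre
  unfold Spec_multiply_three_largest
  exact pvMain data basins hpre.2.2
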